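-- pv_equiv track=rewrite | github.com/Lincoln-LM/pla-reverse-gui | pla_reverse_gui/window/generator_window.py | compute_result_count_variable
-- ===== SOURCE A (Python) =====
-- def compute_result_count_variable(spawn_counts: list[int]):
--     """Calculate the total amount of results to be generated for a given variable multi spawner"""
--     # number of results at each step that have the corresponding num_spawned
--     counts = {
--         1: 0,
--         # variable spawners always start with 2 spawns
--         2: 1,
--         3: 0
--     }
--     total_result_count = sum(counts.values())
--     for spawn_count in spawn_counts[1:]:
--         new_counts = {
--             1: 0,
--             2: 0,
--             3: 0
--         }
--         for num_spawned in range(1, 4):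
--             # a num_spawned of N can be advanced N + 1 ways
--             # KOing 0,1,2,...,N spawns
--             for ko_count in range(num_spawned + 1):
--                 # KOing M spawns reduces the spawn count to num_spawned - M
--                 # meaning after this step the num_spawned will be max(num_spawned - M, spawn_count)
--                 # as num_spawned will either remain the same (if its >= spawn_count)
--                 # or increase to spawn_count
--                 # (this loop is the same as just looping over num_spawned - ko_count in reverse)
--                 new_counts[max(num_spawned - ko_count, spawn_count)] += counts[num_spawned]
--         total_result_count += sum(new_counts.values())
--         counts = new_counts
--
--     return total_result_count
-- ===== SOURCE B (Python) =====
-- def compute_result_count_variable(spawn_counts: list[int]):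
--     """Calculate the total amount of results to be generated for a given variable multi spawner"""
--     # Instead of tracking the count of results per num_spawned, track three
--     # aggregate moments of that distribution: the total number of results
--     # s0 = c1+c2+c3, the weighted sum s1 = 1*c1+2*c2+3*c3, and c3 alone.
--     # Each result with n spawned branches into n+1 results, so the new total
--     # is always s0 + s1 regardless of spawn_count; the other two moments have
--     # closed-form updates per spawn_count.  Variable spawners start with one
--     # result having 2 spawns: (c1,c2,c3) = (0,1,0).
--     s0, s1, c3 = 1, 2, 0
--     total_result_count = s0
--     for spawn_count in spawn_counts[1:]:
--         if spawn_count == 1: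
--             s0, s1, c3 = s0 + s1, 2 * s1 + c3, c3
--         elif spawn_count == 2:
--             s0, s1, c3 = s0 + s1, 2 * s0 + 2 * s1 + c3, c3
--         elif spawn_count == 3:
--             s0, s1, c3 = s0 + s1, 3 * (s0 + s1), s0 + s1
--         else:
--             raise KeyError(spawn_count)
--         total_result_count += s0
--     return total_result_count
-- ===== Notes on version B (the rewrite author's own statement) =====
-- stated objective: alternative
-- what changed: Instead of tracking the per-num_spawned count distribution with a scatter double loop, B tracks three aggregate moments (total count s0, weighted sum s1, and c3) which determine it, using the fact that every result with n spawns branches into n+1 results so the new total is always s0+s1, with closed-form per-spawn_count updates for the other moments.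
import Mathlib
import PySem

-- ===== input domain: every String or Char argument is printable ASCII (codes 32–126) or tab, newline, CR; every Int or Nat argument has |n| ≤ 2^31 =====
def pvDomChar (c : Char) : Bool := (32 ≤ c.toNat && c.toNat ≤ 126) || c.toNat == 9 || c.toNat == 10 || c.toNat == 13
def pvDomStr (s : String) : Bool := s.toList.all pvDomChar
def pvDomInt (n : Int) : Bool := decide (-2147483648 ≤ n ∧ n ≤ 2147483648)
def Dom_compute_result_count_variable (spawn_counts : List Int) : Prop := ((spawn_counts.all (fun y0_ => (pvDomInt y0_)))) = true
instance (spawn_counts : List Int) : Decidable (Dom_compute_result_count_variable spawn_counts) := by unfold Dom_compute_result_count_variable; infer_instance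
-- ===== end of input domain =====

-- B tracks three aggregate moments (total, weighted sum, count-with-3) of A's per-spawn-count
-- distribution instead of the distribution itself; equivalence on Pre_ (elements of
-- spawn_counts[1:] in {1,2,3}, where A does not raise KeyError).

-- ===== PORT A =====
-- counts dict {1:_,2:_,3:_} is represented as the triple (counts[1], counts[2], counts[3]);
-- under Pre_ every key read/written is in {1,2,3}, so this is the dict step for step.
def pvGetA (c : Int × Int × Int) (k : Int) : Int :=
  if k = 1 then c.1 else if k = 2 then c.2.1 else c.2.2

def pvBumpA (k : Int) (v : Int) (c : Int × Int × Int) : Int × Int × Int :=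
  if k = 1 then (c.1 + v, c.2.1, c.2.2)
  else if k = 2 then (c.1, c.2.1 + v, c.2.2)
  else (c.1, c.2.1, c.2.2 + v)

-- one iteration of the outer 'for spawn_count in spawn_counts[1:]' body (the two nested range loops)
def pvStepA (counts : Int × Int × Int) (s : Int) : Int × Int × Int :=
  (PySem.List.pyRange 1 4 1).foldl
    (fun nc num_spawned =>
      (PySem.List.pyRange 0 (num_spawned + 1) 1).foldl
        (fun nc ko_count => pvBumpA (max (num_spawned - ko_count) s) (pvGetA counts num_spawned) nc)
        nc)
    (0, 0, 0)

def compute_result_count_variable (spawn_counts : List Int) : Int :=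
  let counts : Int × Int × Int := (0, 1, 0)
  let total := counts.1 + counts.2.1 + counts.2.2
  let st := (PySem.List.slice spawn_counts (some 1) none).foldl
    (fun (st : (Int × Int × Int) × Int) s =>
      let nc := pvStepA st.1 s
      (nc, st.2 + (nc.1 + nc.2.1 + nc.2.2)))
    (counts, total)
  st.2

-- ===== PORT B =====
-- state is the moment triple (s0, s1, c3); the final branch is unreachable under Pre_
-- (the Python raises KeyError there, excluded by Pre_).
def pvStepB (m : Int × Int × Int) (s : Int) : Int × Int × Int :=
  if s = 1 then (m.1 + m.2.1, 2 * m.2.1 + m.2.2, m.2.2)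
  else if s = 2 then (m.1 + m.2.1, 2 * m.1 + 2 * m.2.1 + m.2.2, m.2.2)
  else if s = 3 then (m.1 + m.2.1, 3 * (m.1 + m.2.1), m.1 + m.2.1)
  else (0, 0, 0)

def compute_result_count_variable_alt (spawn_counts : List Int) : Int :=
  let st := (PySem.List.slice spawn_counts (some 1) none).foldl
    (fun (st : (Int × Int × Int) × Int) s =>
      let nm := pvStepB st.1 s
      (nm, st.2 + nm.1))
    (((1, 2, 0) : Int × Int × Int), 1)
  st.2

-- ===== PRECONDITION & SPEC =====
-- Pre_ excludes exactly the inputs on which A raises KeyError: some element of spawn_counts[1:] outside {1,2,3}.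
def Pre_compute_result_count_variable (spawn_counts : List Int) : Prop :=
  ∀ x ∈ spawn_counts.tail, x = 1 ∨ x = 2 ∨ x = 3
instance (spawn_counts : List Int) : Decidable (Pre_compute_result_count_variable spawn_counts) := by
  unfold Pre_compute_result_count_variable; infer_instance

def pvWitness_compute_result_count_variable : List Int := [2, 1, 3, 2]

def Spec_compute_result_count_variable (spawn_counts : List Int) (out : Int) : Prop := out = compute_result_count_variable_alt spawn_counts
instance (spawn_counts : List Int) (out : Int) : Decidable (Spec_compute_result_count_variable spawn_counts out) := by unfold Spec_compute_result_count_variable; infer_instance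

-- ===== CLAIM (what is proved, stated in full; the proofs are below) =====
def Claim_equal_compute_result_count_variable : Prop := ∀ (spawn_counts : List Int), Dom_compute_result_count_variable spawn_counts → Pre_compute_result_count_variable spawn_counts → Spec_compute_result_count_variable spawn_counts (compute_result_count_variable spawn_counts)

-- ===== LEMMAS AND PROOFS =====

-- B's moment state m corresponds to A's count triple c
def pvRel (c m : Int × Int × Int) : Prop :=
  m.1 = c.1 + c.2.1 + c.2.2 ∧ m.2.1 = c.1 + 2 * c.2.1 + 3 * c.2.2 ∧ m.2.2 = c.2.2

lemma pvStep_rel (c m : Int × Int × Int) (s : Int) (hs : s = 1 ∨ s = 2 ∨ s = 3)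
    (h : pvRel c m) : pvRel (pvStepA c s) (pvStepB m s) := by
  obtain ⟨c1, c2, c3⟩ := c
  obtain ⟨m1, m2, m3⟩ := m
  obtain ⟨h1, h2, h3⟩ := h
  simp only at h1 h2 h3
  have h14 : PySem.List.pyRange 1 4 1 = [1, 2, 3] := by decide
  have h02 : PySem.List.pyRange 0 2 1 = [0, 1] := by decide
  have h03 : PySem.List.pyRange 0 3 1 = [0, 1, 2] := by decide
  have h04 : PySem.List.pyRange 0 4 1 = [0, 1, 2, 3] := by decide
  rcases hs with rfl | rfl | rfl <;>
    · simp [pvStepA, pvStepB, pvRel, h14, h02, h03, h04, pvBumpA, pvGetA, List.foldl]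
      omega

lemma pvFold_rel (l : List Int) (hl : ∀ x ∈ l, x = 1 ∨ x = 2 ∨ x = 3)
    (c m : Int × Int × Int) (t : Int) (h : pvRel c m) :
    (l.foldl (fun st s => let nc := pvStepA st.1 s; (nc, st.2 + (nc.1 + nc.2.1 + nc.2.2))) (c, t)).2
      = (l.foldl (fun st s => let nm := pvStepB st.1 s; (nm, st.2 + nm.1)) (m, t)).2 := by
  induction l generalizing c m t with
  | nil => rfl
  | cons x xs ih =>
      have hx := hl x (by simp)
      have hrel := pvStep_rel c m x hx h
      have hsum : (pvStepA c x).1 + (pvStepA c x).2.1 + (pvStepA c x).2.2 = (pvStepB m x).1 := by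
        obtain ⟨e1, _, _⟩ := hrel; omega
      simpa [hsum] using ih (fun y hy => hl y (by simp [hy])) (pvStepA c x) (pvStepB m x)
        (t + (pvStepB m x).1) hrel

-- ===== VERDICT (by name: the statement is the Claim_ definition above) =====
theorem compute_result_count_variable_spec : Claim_equal_compute_result_count_variable := by
  intro xs _ hpre
  unfold Spec_compute_result_count_variable compute_result_count_variable compute_result_count_variable_alt
  rw [PySem.List.slice_from_one]
  exact pvFold_rel xs.tail hpre (0, 1, 0) (1, 2, 0) 1 (by simp [pvRel])
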